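-- pv_equiv track=rewrite | github.com/mytherapy-coding/coding | leetcode/leetcode_75/can_place_flowers/can_place_flowers.py | canPlaceFlowers3
-- ===== SOURCE A (Python) =====
-- def canPlaceFlowers3(flowerbed: list[int], n: int) -> bool:
--     flowerbed = flowerbed[:]
--     if n <= 0:
--         return True
--     if not flowerbed:
--         return False
--     if len(flowerbed) == 1:
--         return flowerbed[0] == 0 and n <= 1
--
--     count = 0
--     for i in range(len(flowerbed)):
--         if flowerbed[i] == 0:
--             if (i == 0 or flowerbed[i - 1] == 0) and (
--                 i == len(flowerbed) - 1 or flowerbed[i + 1] == 0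
--             ):
--                 flowerbed[i] = 1
--                 count += 1
--     return count >= n
-- ===== SOURCE B (Python) =====
-- def canPlaceFlowers3(flowerbed: list[int], n: int) -> bool:
--     if n <= 0:
--         return True
--     total = 0
--     run = 1  # virtual empty slot before index 0
--     for x in flowerbed:
--         if x == 0:
--             run += 1
--         else:
--             if run:
--                 total += (run - 1) // 2
--             run = 0
--     total += run // 2  # virtual empty slot after the last index
--     return total >= n
-- ===== Notes on version B (the rewrite author's own statement) =====
-- stated objective: simpler
-- what changed: Replaced A's copy-then-mutate greedy slot placement (index loop with neighbour lookups, in-place writes, and special cases for empty and length-1 beds) by a single pass that counts (run-1)//2 plantable flowers per maximal run of empty slots, with a virtual empty slot at each end; no mutation and no special cases.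
import Mathlib
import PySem

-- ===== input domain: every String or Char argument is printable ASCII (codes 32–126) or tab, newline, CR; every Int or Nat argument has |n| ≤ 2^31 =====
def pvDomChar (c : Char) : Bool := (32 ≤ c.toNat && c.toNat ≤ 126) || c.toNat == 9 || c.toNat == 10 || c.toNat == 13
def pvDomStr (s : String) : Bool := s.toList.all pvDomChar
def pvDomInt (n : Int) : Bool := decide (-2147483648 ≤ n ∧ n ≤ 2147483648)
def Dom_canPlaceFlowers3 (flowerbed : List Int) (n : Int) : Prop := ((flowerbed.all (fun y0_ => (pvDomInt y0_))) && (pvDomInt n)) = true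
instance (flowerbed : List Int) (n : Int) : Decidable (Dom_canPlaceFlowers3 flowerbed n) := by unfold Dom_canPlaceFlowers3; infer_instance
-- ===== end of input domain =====

-- B replaces A's mutating greedy slot-placement by a one-pass gap count ((run-1)//2 per run of
-- empty slots, with virtual empty slots at both ends); equivalent return value (A's copy-then-mutate
-- touches only its local copy, so there is no observable side effect). Objective: simpler.


-- ===== PORT A =====
-- one loop iteration of A: i-th step of `for i in range(len(flowerbed))` over state (flowerbed, count)
def stepA (s : List Int × Int) (i : Nat) : List Int × Int :=
  if s.1.getD i 0 = 0 then
    if (i = 0 ∨ s.1.getD (i - 1) 0 = 0) ∧ (i = s.1.length - 1 ∨ s.1.getD (i + 1) 0 = 0) then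
      (s.1.set i 1, s.2 + 1)
    else s
  else s

def canPlaceFlowers3 (flowerbed : List Int) (n : Int) : Bool :=
  -- `flowerbed = flowerbed[:]`: A mutates only a local copy, so the port works on the list value
  if n ≤ 0 then true
  else if flowerbed = [] then false
  else if flowerbed.length = 1 then decide (flowerbed.getD 0 0 = 0 ∧ n ≤ 1)
  else
    decide (((List.range flowerbed.length).foldl stepA (flowerbed, (0 : Int))).2 ≥ n)

-- ===== PORT B =====
-- one loop iteration of B over state (total, run)
def stepB (s : Int × Int) (x : Int) : Int × Int :=
  if x = 0 then (s.1, s.2 + 1)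
  else ((if s.2 ≠ 0 then s.1 + PySem.Int.floordiv (s.2 - 1) 2 else s.1), 0)

def canPlaceFlowers3_alt (flowerbed : List Int) (n : Int) : Bool :=
  if n ≤ 0 then true
  else
    decide ((flowerbed.foldl stepB ((0 : Int), (1 : Int))).1
      + PySem.Int.floordiv (flowerbed.foldl stepB ((0 : Int), (1 : Int))).2 2 ≥ n)

-- ===== PRECONDITION & SPEC =====
def Spec_canPlaceFlowers3 (flowerbed : List Int) (n : Int) (out : Bool) : Prop := out = canPlaceFlowers3_alt flowerbed n
instance (flowerbed : List Int) (n : Int) (out : Bool) : Decidable (Spec_canPlaceFlowers3 flowerbed n out) := by unfold Spec_canPlaceFlowers3; infer_instance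

-- ===== CLAIM (what is proved, stated in full; the proofs are below) =====
def Claim_equal_canPlaceFlowers3 : Prop := ∀ (flowerbed : List Int) (n : Int), Dom_canPlaceFlowers3 flowerbed n → Spec_canPlaceFlowers3 flowerbed n (canPlaceFlowers3 flowerbed n)

-- ===== LEMMAS AND PROOFS =====

-- ghost of A's loop: count produced on suffix `l`, `prev` = "left neighbour empty (or i = 0)"
def gA : Bool → List Int → Int
  | _, [] => 0
  | prev, x :: r =>
    if x = 0 ∧ prev = true ∧ (r = [] ∨ r.getD 0 0 = 0) then 1 + gA false r
    else gA (decide (x = 0)) r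

-- ghost of B's loop: final total contributed by suffix `l` given current run length `run`
def gB : Int → List Int → Int
  | run, [] => PySem.Int.floordiv run 2
  | run, x :: r =>
    if x = 0 then gB (run + 1) r
    else (if run ≠ 0 then PySem.Int.floordiv (run - 1) 2 else 0) + gB 0 r

theorem fdiv_two_mul (a : Int) : PySem.Int.floordiv (2 * a) 2 = a := by
  rw [PySem.Int.floordiv_eq_ediv_of_pos (by omega)]; omega

theorem fdiv_two_mul_add_one (a : Int) : PySem.Int.floordiv (2 * a + 1) 2 = a := by
  rw [PySem.Int.floordiv_eq_ediv_of_pos (by omega)]; omega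

theorem gA_nil (p : Bool) : gA p [] = 0 := rfl

theorem gA_cons (p : Bool) (x : Int) (r : List Int) :
    gA p (x :: r) = if x = 0 ∧ p = true ∧ (r = [] ∨ r.getD 0 0 = 0) then 1 + gA false r
      else gA (decide (x = 0)) r := rfl

theorem gB_nil (run : Int) : gB run [] = PySem.Int.floordiv run 2 := rfl

theorem gB_cons (run x : Int) (r : List Int) :
    gB run (x :: r) = if x = 0 then gB (run + 1) r
      else (if run ≠ 0 then PySem.Int.floordiv (run - 1) 2 else 0) + gB 0 r := rfl

theorem foldB_eq (l : List Int) : ∀ (t run : Int),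
    (l.foldl stepB (t, run)).1 + PySem.Int.floordiv (l.foldl stepB (t, run)).2 2 = t + gB run l := by
  induction l with
  | nil => intro t run; rw [List.foldl_nil, gB_nil]
  | cons x r ih =>
    intro t run
    by_cases hx : x = 0
    · rw [List.foldl_cons, show stepB (t, run) x = (t, run + 1) from by simp [stepB, hx],
        ih, gB_cons, if_pos hx]
    · rw [List.foldl_cons,
        show stepB (t, run) x = ((if run ≠ 0 then t + PySem.Int.floordiv (run - 1) 2 else t), 0)
          from by simp [stepB, hx]]
      by_cases hr : run = 0
      · rw [if_neg (fun h => h hr), ih, gB_cons, if_neg hx, if_neg (fun h => h hr)]; ring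
      · rw [if_pos hr, ih, gB_cons, if_neg hx, if_pos hr]; ring

-- the gap/greedy invariant, all four reachable state shapes at once
theorem inv_gB_gA (l : List Int) :
    (∀ k : Int, 0 ≤ k → gB (2 * k + 1) l = gA true l + k) ∧
    (gB 0 l = gA false l) ∧
    (∀ k : Int, 0 ≤ k → (l = [] ∨ l.getD 0 0 = 0) → gB (2 * k) l = gA false l + k) ∧
    (∀ k : Int, 0 ≤ k → l ≠ [] → l.getD 0 0 ≠ 0 → gB (2 * k + 2) l = gA true l + k) := by
  induction l with
  | nil =>
    refine ⟨?_, ?_, ?_, ?_⟩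
    · intro k _; rw [gB_nil, gA_nil, fdiv_two_mul_add_one]; ring
    · rw [gB_nil, gA_nil]; rfl
    · intro k _ _; rw [gB_nil, gA_nil, fdiv_two_mul]; ring
    · intro k _ h _; exact absurd rfl h
  | cons x r ih =>
    obtain ⟨iha, ihb, ihc, ihd⟩ := ih
    by_cases hx : x = 0
    · refine ⟨?_, ?_, ?_, ?_⟩
      · intro k hk
        rw [gB_cons, if_pos hx, gA_cons]
        by_cases hr : r = [] ∨ r.getD 0 0 = 0
        · rw [if_pos ⟨hx, rfl, hr⟩, show (2 : Int) * k + 1 + 1 = 2 * (k + 1) from by ring,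
            ihc (k + 1) (by omega) hr]
          ring
        · push_neg at hr
          rw [if_neg (fun h => hr.2 (h.2.2.resolve_left hr.1)),
            show (2 : Int) * k + 1 + 1 = 2 * k + 2 from by ring, ihd k hk hr.1 hr.2, hx]
          simp
      · rw [gB_cons, if_pos hx, gA_cons,
          if_neg (fun (h : _ ∧ (false = true) ∧ _) => by simpa using h.2.1),
          show (0 : Int) + 1 = 2 * 0 + 1 from by ring, iha 0 le_rfl, hx]
        simp
      · intro k hk _
        rw [gB_cons, if_pos hx, gA_cons,
          if_neg (fun (h : _ ∧ (false = true) ∧ _) => by simpa using h.2.1),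
          show (2 : Int) * k + 1 = 2 * k + 1 from rfl, iha k hk, hx]
        simp
      · intro k _ _ h; exact absurd (by simp [hx]) h
    · have hA : ∀ p : Bool, gA p (x :: r) = gA false r := by
        intro p
        rw [gA_cons, if_neg (fun h => hx h.1)]
        simp [hx]
      refine ⟨?_, ?_, ?_, ?_⟩
      · intro k _
        rw [gB_cons, if_neg hx, if_pos (by omega : (2 : Int) * k + 1 ≠ 0),
          show (2 : Int) * k + 1 - 1 = 2 * k from by ring, fdiv_two_mul, ihb, hA]
        ring
      · rw [gB_cons, if_neg hx, if_neg (fun h => h rfl), ihb, hA]; ring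
      · intro k _ h
        rcases h with h | h
        · exact absurd h (by simp)
        · exact absurd h (by simpa using hx)
      · intro k hk _ _
        rw [gB_cons, if_neg hx, if_pos (by omega : (2 : Int) * k + 2 ≠ 0),
          show (2 : Int) * k + 2 - 1 = 2 * k + 1 from by ring, fdiv_two_mul_add_one, ihb, hA]
        ring

theorem getD_append_length (p l : List Int) (d : Int) : (p ++ l).getD p.length d = l.getD 0 d := by
  induction p with
  | nil => rfl
  | cons a p ih => simpa using ih

theorem set_append_length (p : List Int) (x : Int) (r : List Int) (v : Int) :
    (p ++ x :: r).set p.length v = p ++ v :: r := by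
  induction p with
  | nil => rfl
  | cons a p ih => simpa using ih

theorem getD_append_left (p l : List Int) (d : Int) (k : Nat) (h : k < p.length) :
    (p ++ l).getD k d = p.getD k d := by
  simp [List.getD_eq_getElem?_getD, List.getElem?_append_left h]

theorem foldA_eq (l : List Int) : ∀ (p : List Int) (c : Int),
    ((List.range' p.length l.length).foldl stepA (p ++ l, c)).2
      = c + gA (decide (p = [] ∨ p.getD (p.length - 1) 0 = 0)) l := by
  induction l with
  | nil => intro p c; simp [gA_nil]
  | cons x r ih =>
    intro p c
    rw [List.length_cons, List.range'_succ, List.foldl_cons]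
    have hget : (p ++ x :: r).getD p.length 0 = x := by
      simpa using getD_append_length p (x :: r) 0
    have hget1 : (p ++ x :: r).getD (p.length + 1) 0 = r.getD 0 0 := by
      have := getD_append_length (p ++ [x]) r 0
      simpa [List.append_assoc] using this
    have hlen : (p.length = (p ++ x :: r).length - 1) ↔ r = [] := by
      cases r with
      | nil => simp
      | cons y t => simp [List.length_append]
    have hprev : (p.length = 0 ∨ (p ++ x :: r).getD (p.length - 1) 0 = 0)
        ↔ (p = [] ∨ p.getD (p.length - 1) 0 = 0) := by
      cases p with
      | nil => simp
      | cons a q =>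
        have hlt : (a :: q).length - 1 < (a :: q).length := by simp
        rw [getD_append_left _ _ _ _ hlt]
        simp
    by_cases hc : x = 0 ∧ (p = [] ∨ p.getD (p.length - 1) 0 = 0) ∧ (r = [] ∨ r.getD 0 0 = 0)
    · obtain ⟨hx, hp, hr⟩ := hc
      subst hx
      have hstep : stepA (p ++ 0 :: r, c) p.length = (p ++ 1 :: r, c + 1) := by
        have hc2 : p.length = (p ++ 0 :: r).length - 1 ∨ (p ++ 0 :: r).getD (p.length + 1) 0 = 0 := by
          rcases hr with h | h
          · exact Or.inl (hlen.mpr h)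
          · exact Or.inr (hget1.trans h)
        simp only [stepA]
        rw [if_pos hget, if_pos ⟨hprev.mpr hp, hc2⟩, set_append_length]
      rw [hstep, show (p ++ 1 :: r : List Int) = (p ++ [1]) ++ r from by simp,
        show p.length + 1 = (p ++ [(1 : Int)]).length from by simp, ih (p ++ [1]) (c + 1),
        gA_cons, if_pos ⟨rfl, decide_eq_true hp, hr⟩]
      have hd : (decide ((p ++ [(1 : Int)]) = [] ∨ (p ++ [(1 : Int)]).getD ((p ++ [(1 : Int)]).length - 1) 0 = 0)) = false := by
        simp [getD_append_length p [(1 : Int)] 0]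
      rw [hd]
      ring
    · have hstep : stepA (p ++ x :: r, c) p.length = (p ++ x :: r, c) := by
        by_cases hx : x = 0
        · subst hx
          simp only [stepA]
          rw [if_pos hget, if_neg]
          intro ⟨h1, h2⟩
          refine hc ⟨rfl, hprev.mp h1, ?_⟩
          rcases h2 with h | h
          · exact Or.inl (hlen.mp h)
          · exact Or.inr (hget1.symm.trans h)
        · simp only [stepA]
          rw [if_neg (fun h => hx (hget.symm.trans h))]
      rw [hstep, show (p ++ x :: r : List Int) = (p ++ [x]) ++ r from by simp,
        show p.length + 1 = (p ++ [x]).length from by simp, ih (p ++ [x]) c,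
        gA_cons, if_neg (fun h => hc ⟨h.1, of_decide_eq_true h.2.1, h.2.2⟩)]
      have hdec : (decide ((p ++ [x]) = [] ∨ (p ++ [x]).getD ((p ++ [x]).length - 1) 0 = 0)) = decide (x = 0) := by
        simp [getD_append_length p [x] 0]
      rw [hdec]

-- the two whole-bed counts coincide
theorem counts_eq (bed : List Int) :
    ((List.range bed.length).foldl stepA (bed, (0 : Int))).2
      = (bed.foldl stepB ((0 : Int), (1 : Int))).1
        + PySem.Int.floordiv (bed.foldl stepB ((0 : Int), (1 : Int))).2 2 := by
  have hA := foldA_eq bed [] 0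
  simp only [List.nil_append, List.length_nil] at hA
  rw [List.range_eq_range']
  rw [hA, foldB_eq bed 0 1]
  have h1 : (1 : Int) = 2 * 0 + 1 := by ring
  rw [h1, (inv_gB_gA bed).1 0 le_rfl]
  simp

-- ===== VERDICT (by name: the statement is the Claim_ definition above) =====
theorem canPlaceFlowers3_spec : Claim_equal_canPlaceFlowers3 := by
  intro bed n _
  unfold Spec_canPlaceFlowers3 canPlaceFlowers3 canPlaceFlowers3_alt
  by_cases hn : n ≤ 0
  · simp [hn]
  · rw [if_neg hn, if_neg hn]
    cases bed with
    | nil =>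
      rw [if_pos rfl]
      simp [stepB]
      omega
    | cons v t =>
      cases t with
      | nil =>
        rw [if_neg (by simp : ¬(v :: [] : List Int) = []),
          if_pos (by simp : (v :: [] : List Int).length = 1)]
        by_cases hv : v = 0
        · subst hv
          have hB : (List.foldl stepB ((0 : Int), (1 : Int)) [(0 : Int)]).1
              + PySem.Int.floordiv (List.foldl stepB ((0 : Int), (1 : Int)) [(0 : Int)]).2 2 = 1 := by
            decide
          rw [hB]
          have h1 : (([(0 : Int)]).getD 0 0 = 0 ∧ n ≤ 1) ↔ ((1 : Int) ≥ n) := by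
            rw [List.getD_cons_zero]; omega
          rw [decide_eq_decide.mpr h1]
        · have hB : (List.foldl stepB ((0 : Int), (1 : Int)) [v]).1
              + PySem.Int.floordiv (List.foldl stepB ((0 : Int), (1 : Int)) [v]).2 2 = 0 := by
            simp [stepB, hv]
          rw [hB]
          have h1 : (([v]).getD 0 0 = 0 ∧ n ≤ 1) ↔ ((0 : Int) ≥ n) := by
            rw [List.getD_cons_zero]
            constructor
            · intro h; exact absurd h.1 hv
            · intro h; omega
          rw [decide_eq_decide.mpr h1]
      | cons w t' =>
        rw [if_neg (by simp : ¬(v :: w :: t' : List Int) = []),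
          if_neg (by simp : ¬(v :: w :: t' : List Int).length = 1)]
        rw [counts_eq (v :: w :: t')]
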